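-- pv_equiv track=rewrite | github.com/wulffern/cicsim | cicsim/cmdwave_pg.py | _vector_transitions
-- ===== SOURCE A (Python) =====
-- def _vector_transitions(raw):
--     """Indices in ``raw`` where the vector value changes (incl. 0)."""
--     out = [0]
--     prev = raw[0] if len(raw) else None
--     for i in range(1, len(raw)):
--         v = raw[i]
--         if v != prev:
--             out.append(i)
--             prev = v
--     return out
-- ===== SOURCE B (Python) =====
-- def _vector_transitions(raw):
--     """Indices in ``raw`` where the vector value changes (incl. 0)."""
--     out = []
--     i, n = 0, len(raw)
--     while i < n:
--         out.append(i)          # i is the start of a maximal run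
--         j = i + 1
--         while j < n and raw[j] == raw[i]:
--             j += 1             # skip past the run of values equal to raw[i]
--         i = j
--     return out or [0]
-- ===== Notes on version B (the rewrite author's own statement) =====
-- stated objective: alternative
-- what changed: Replaces A's single pass with a prev accumulator by a run-skipping two-pointer scan: an outer loop emits each maximal run's start index and an inner loop jumps past all elements equal to the run's first value; the empty input keeps A's sentinel via the final 'or' fallback.
import Mathlib
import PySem

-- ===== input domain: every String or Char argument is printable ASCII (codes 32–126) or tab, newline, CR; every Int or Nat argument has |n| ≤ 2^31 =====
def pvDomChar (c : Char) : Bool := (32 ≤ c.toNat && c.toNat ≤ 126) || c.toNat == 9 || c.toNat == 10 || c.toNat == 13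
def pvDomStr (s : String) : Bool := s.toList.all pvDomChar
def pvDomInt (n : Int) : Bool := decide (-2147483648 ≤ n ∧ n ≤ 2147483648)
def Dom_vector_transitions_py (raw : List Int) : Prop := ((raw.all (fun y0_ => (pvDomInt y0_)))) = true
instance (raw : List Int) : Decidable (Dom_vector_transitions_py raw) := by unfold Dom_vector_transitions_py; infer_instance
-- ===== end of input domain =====

-- B replaces A's prev-accumulator pass by a run-skipping two-pointer scan: the outer
-- loop emits each maximal run's start index, the inner loop jumps past the run (alternative).

-- ===== PORT A =====
-- out = [0]; prev = raw[0] if len(raw) else None; for i in range(1, len(raw)): …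
def vector_transitions_py (raw : List Int) : List Int :=
  ((PySem.List.pyRange 1 (raw.length : Int) 1).foldl
    (fun (st : List Int × Option Int) i =>
      if some (PySem.List.pyGetD raw i 0) ≠ st.2 then (st.1 ++ [i], some (PySem.List.pyGetD raw i 0)) else st)
    ([0], PySem.List.pyGet? raw 0)).1   -- pyGet? raw 0 is none ↔ Python's None (empty raw); pyGetD's default is never used (i in range)

-- ===== PORT B =====
-- inner while loop `j = i + 1; while j < n and raw[j] == raw[i]: j += 1`;
-- the fuel argument only makes the recursion structural (raw.length steps always suffice)
def pvSkip (raw : List Int) (v : Int) : Nat → Nat → Nat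
  | 0, j => j
  | f + 1, j => if j < raw.length ∧ raw.getD j 0 = v then pvSkip raw v f (j + 1) else j

-- outer while loop `while i < n: out.append(i); …inner…; i = j`, fueled the same way
def pvOuter (raw : List Int) : Nat → Nat → List Int → List Int
  | 0, _, out => out
  | f + 1, i, out =>
    if i < raw.length then
      pvOuter raw f (pvSkip raw (raw.getD i 0) raw.length (i + 1)) (out ++ [(i : Int)])
    else out

def vector_transitions_py_alt (raw : List Int) : List Int :=
  let out := pvOuter raw (raw.length + 1) 0 []
  if out = [] then [0] else out   -- Python's `return out or [0]`

-- ===== PRECONDITION & SPEC =====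
def Spec_vector_transitions_py (raw : List Int) (out : List Int) : Prop := out = vector_transitions_py_alt raw
instance (raw : List Int) (out : List Int) : Decidable (Spec_vector_transitions_py raw out) := by unfold Spec_vector_transitions_py; infer_instance

-- ===== CLAIM (what is proved, stated in full; the proofs are below) =====
def Claim_equal_vector_transitions_py : Prop := ∀ (raw : List Int), Dom_vector_transitions_py raw → Spec_vector_transitions_py raw (vector_transitions_py raw)

-- ===== LEMMAS AND PROOFS =====

-- length of the maximal prefix of xs whose elements equal v
def pvCnt (v : Int) : List Int → Nat
  | [] => 0
  | x :: xs => if x = v then pvCnt v xs + 1 else 0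

theorem pvCnt_le (v : Int) (xs : List Int) : pvCnt v xs ≤ xs.length := by
  induction xs with
  | nil => simp [pvCnt]
  | cons x xs ih => simp only [pvCnt, List.length_cons]; split; · omega
                    · omega

-- structural counterpart of B's run recursion (proof device, not a port)
def pvStarts : List Int → Int → List Int
  | [], _ => []
  | v :: xs, idx => idx :: pvStarts (xs.drop (pvCnt v xs)) (idx + 1 + (pvCnt v xs : Int))
termination_by xs _ => xs.length
decreasing_by simp only [List.length_drop, List.length_cons]; omega

-- named unfolding equations for the well-founded pvStarts
theorem pvStarts_nil (idx : Int) : pvStarts [] idx = [] := by rw [pvStarts.eq_def]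
theorem pvStarts_cons (v : Int) (xs : List Int) (idx : Int) :
    pvStarts (v :: xs) idx
    = idx :: pvStarts (xs.drop (pvCnt v xs)) (idx + 1 + (pvCnt v xs : Int)) := by
  rw [pvStarts.eq_def]

-- the common normal form both programs are reduced to
def pvFilt (l : List (Int × Int × Int)) : List Int :=
  l.filterMap (fun p => if p.2.1 ≠ p.2.2 then some p.1 else none)

-- A's loop, re-expressed over enumerate of the tail, accumulates exactly the
-- filtered indices of unequal adjacent pairs.
theorem pv_loop_runs (t : List Int) : ∀ (h k : Int) (out : List Int),
    ((PySem.List.enumerate t k).foldl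
       (fun (st : List Int × Option Int) p =>
          if some p.2 ≠ st.2 then (st.1 ++ [p.1], some p.2) else st)
       (out, some h)).1
    = out ++ pvFilt (PySem.List.enumerate ((h :: t).zip t) k) := by
  induction t with
  | nil => intro h k out; simp [PySem.List.enumerate_nil, pvFilt]
  | cons v t' ih =>
    intro h k out
    simp only [List.zip_cons_cons, PySem.List.enumerate_cons, List.foldl_cons, pvFilt,
      List.filterMap_cons]
    by_cases hv : v = h
    · subst hv
      rw [if_neg (by simp), ih v (k + 1) out]
      simp [pvFilt]
    · rw [if_pos (by simpa using hv), ih v (k + 1) (out ++ [k])]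
      simp [pvFilt, Ne.symm hv]

-- bridge: A's range-1-to-len fold with pyGetD is the fold over enumerate of the tail
theorem pv_range_fold_eq (h : Int) (t : List Int) (init : List Int × Option Int) :
    (PySem.List.pyRange 1 (((h :: t).length : Int)) 1).foldl
      (fun (st : List Int × Option Int) i =>
        if some (PySem.List.pyGetD (h :: t) i 0) ≠ st.2
        then (st.1 ++ [i], some (PySem.List.pyGetD (h :: t) i 0)) else st) init
    = (PySem.List.enumerate t 1).foldl
        (fun (st : List Int × Option Int) p =>
          if some p.2 ≠ st.2 then (st.1 ++ [p.1], some p.2) else st) init := by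
  have hmap : (PySem.List.pyRange 1 (((h :: t).length : Int)) 1).map
      (fun j => (j, PySem.List.pyGetD (h :: t) j 0)) = PySem.List.enumerate t 1 := by
    have h0 : (0 : Int) < ((h :: t).length : Int) := by
      simp only [List.length_cons]; push_cast; omega
    have he := PySem.List.enumerate_eq_map_pyRange (xs := h :: t) (d := 0)
    simp only [PySem.List.len_eq] at he
    rw [PySem.List.pyRange_one_cons h0, List.map_cons, PySem.List.enumerate_cons] at he
    simp only [List.cons.injEq, zero_add] at he
    exact he.2.symm
  rw [← hmap, List.foldl_map]

-- B's inner while loop computes "start + length of the run of v at start"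
theorem pvSkip_eq (raw : List Int) (v : Int) : ∀ (f j : Nat), raw.length - j ≤ f →
    pvSkip raw v f j = j + pvCnt v (raw.drop j) := by
  intro f
  induction f with
  | zero =>
    intro j hf
    rw [List.drop_eq_nil_of_le (by omega)]
    simp [pvSkip, pvCnt]
  | succ f ih =>
    intro j hf
    rcases Decidable.em (j < raw.length) with hj | hj
    · have hd : raw.drop j = raw[j] :: raw.drop (j + 1) := List.drop_eq_getElem_cons hj
      rcases Decidable.em (raw.getD j 0 = v) with hv | hv
      · rw [pvSkip, if_pos ⟨hj, hv⟩, ih (j + 1) (by omega), hd, pvCnt,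
          if_pos (by simpa [List.getD, hj] using hv)]
        omega
      · rw [pvSkip, if_neg (by tauto), hd, pvCnt,
          if_neg (by simpa [List.getD, hj] using hv)]
        omega
    · rw [List.drop_eq_nil_of_le (by omega)]
      rw [pvSkip, if_neg (by omega)]
      simp [pvCnt]

-- B's outer while loop is the structural run recursion on the suffix
theorem pvOuter_eq (raw : List Int) : ∀ (f i : Nat) (out : List Int), raw.length - i < f →
    pvOuter raw f i out = out ++ pvStarts (raw.drop i) (i : Int) := by
  intro f
  induction f with
  | zero => intro i out hf; omega
  | succ f ih =>
    intro i out hf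
    rcases Decidable.em (i < raw.length) with hi | hi
    · have hd : raw.drop i = raw[i] :: raw.drop (i + 1) := List.drop_eq_getElem_cons hi
      have hgd : raw.getD i 0 = raw[i] := by simp [List.getD, hi]
      have hcle : pvCnt raw[i] (raw.drop (i + 1)) ≤ raw.length - (i + 1) := by
        have := pvCnt_le raw[i] (raw.drop (i + 1)); simpa using this
      have hskip : pvSkip raw (raw.getD i 0) raw.length (i + 1)
          = i + 1 + pvCnt raw[i] (raw.drop (i + 1)) := by
        rw [hgd, pvSkip_eq raw raw[i] raw.length (i + 1) (by omega)]
      rw [pvOuter, if_pos hi, hskip,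
        ih (i + 1 + pvCnt raw[i] (raw.drop (i + 1))) (out ++ [(i : Int)]) (by omega)]
      rw [hd, pvStarts_cons]
      have hdd : raw.drop (i + 1 + pvCnt raw[i] (raw.drop (i + 1)))
          = (raw.drop (i + 1)).drop (pvCnt raw[i] (raw.drop (i + 1))) := by
        rw [List.drop_drop]
      rw [hdd]
      push_cast
      simp [add_assoc]
    · rw [pvOuter, if_neg hi, List.drop_eq_nil_of_le (by omega), pvStarts_nil]
      simp

-- the structural run recursion also reduces to the common normal form
theorem pvStarts_eq (xs : List Int) : ∀ (v idx : Int),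
    pvStarts (v :: xs) idx = idx :: pvFilt (PySem.List.enumerate ((v :: xs).zip xs) (idx + 1)) := by
  induction xs with
  | nil =>
    intro v idx
    rw [pvStarts_cons]
    simp [pvCnt, pvStarts_nil, pvFilt, PySem.List.enumerate_nil]
  | cons w t ih =>
    intro v idx
    by_cases hw : w = v
    · subst hw
      have hcnt : pvCnt w (w :: t) = pvCnt w t + 1 := by simp [pvCnt]
      have h2 := ih w (idx + 1)
      rw [pvStarts_cons] at h2
      have h2t := (List.cons.injEq _ _ _ _ ▸ h2).2
      rw [pvStarts_cons, hcnt]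
      simp only [List.drop_succ_cons, List.zip_cons_cons, PySem.List.enumerate_cons, pvFilt,
        List.filterMap_cons, if_neg (by simp : ¬ (w ≠ w))]
      rw [List.cons.injEq]
      refine ⟨rfl, ?_⟩
      rw [show idx + 1 + ((pvCnt w t + 1 : Nat) : Int) = idx + 1 + 1 + (pvCnt w t : Int) by
        push_cast; ring]
      simpa [pvFilt] using h2t
    · have hcnt : pvCnt v (w :: t) = 0 := by simp [pvCnt, hw]
      rw [pvStarts_cons, hcnt]
      simp only [List.drop_zero, Nat.cast_zero, add_zero]
      rw [ih w (idx + 1)]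
      simp only [List.zip_cons_cons, PySem.List.enumerate_cons, pvFilt, List.filterMap_cons,
        if_pos (show v ≠ w from fun h => hw h.symm)]

-- ===== VERDICT (by name: the statement is the Claim_ definition above) =====
theorem vector_transitions_py_spec : Claim_equal_vector_transitions_py := by
  intro raw _
  unfold Spec_vector_transitions_py
  cases raw with
  | nil => decide
  | cons h t =>
    have hget : PySem.List.pyGet? (h :: t) 0 = some h := by
      simp [PySem.List.pyGet?, PySem.List.pyIdx?]
    have hB : vector_transitions_py_alt (h :: t)
        = 0 :: pvFilt (PySem.List.enumerate ((h :: t).zip t) 1) := by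
      unfold vector_transitions_py_alt
      rw [pvOuter_eq (h :: t) ((h :: t).length + 1) 0 [] (by omega), List.drop_zero]
      rw [show ((0 : Nat) : Int) = 0 from rfl, pvStarts_eq t h 0]
      simp
    rw [hB]
    simp only [vector_transitions_py, hget]
    rw [pv_range_fold_eq h t ([0], some h), pv_loop_runs t h 1 [0]]
    simp
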